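-- pv_equiv track=rewrite | github.com/Brunorochars/Python | Exercicios laços/Exercicio 4.py | produto_impares
-- ===== SOURCE A (Python) =====
-- def produto_impares(numeros):
--     produto = 1  # Inicializa o produto como 1
--     tem_impar = False  # Variável para verificar se há ímpares
--     for n in numeros:
--         if n % 2 != 0:  # Se o número for ímpar
--             produto *= n  # Multiplica ao produto
--             tem_impar = True  # Marca que encontrou um ímpar
--     # Retorna o produto, ou 0 se não houver ímpares
--     return produto if tem_impar else 0
-- ===== SOURCE B (Python) =====
-- def produto_impares(numeros):
--     # Divide-and-conquer: optional product of the odd numbers in a segment,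
--     # None meaning "no odd number in this segment"; merge halves by multiplying.
--     def go(seg):
--         if not seg:
--             return None
--         if len(seg) == 1:
--             return seg[0] if seg[0] % 2 != 0 else None
--         mid = len(seg) // 2
--         left = go(seg[:mid])
--         right = go(seg[mid:])
--         if left is None:
--             return right
--         if right is None:
--             return left
--         return left * right
--     res = go(numeros)
--     return 0 if res is None else res
-- ===== Notes on version B (the rewrite author's own statement) =====
-- stated objective: alternative
-- what changed: Replaces A's single left-to-right accumulator loop with a flag by a divide-and-conquer reduction: the list is split in half recursively, each half yields an Optional product of its odd numbers (None = no odds), and halves are merged by multiplication; no flag and no accumulator loop remain.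
import Mathlib
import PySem

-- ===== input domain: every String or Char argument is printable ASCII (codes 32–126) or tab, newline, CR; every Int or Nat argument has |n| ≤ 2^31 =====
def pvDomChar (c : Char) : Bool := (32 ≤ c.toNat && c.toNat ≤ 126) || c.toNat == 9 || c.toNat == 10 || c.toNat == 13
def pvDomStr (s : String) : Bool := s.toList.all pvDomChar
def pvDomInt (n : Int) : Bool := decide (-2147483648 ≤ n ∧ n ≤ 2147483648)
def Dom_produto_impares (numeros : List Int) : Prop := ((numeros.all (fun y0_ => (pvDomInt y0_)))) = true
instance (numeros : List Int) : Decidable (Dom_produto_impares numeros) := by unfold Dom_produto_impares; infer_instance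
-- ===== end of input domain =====

-- B replaces A's accumulator loop with a flag by a divide-and-conquer reduction merging
-- optional odd-products of the two halves (alternative decomposition; same result).

-- ===== PORT A =====
-- loop over numeros carrying (produto, tem_impar)
def produto_impares (numeros : List Int) : Int :=
  let st := numeros.foldl
    (fun (st : Int × Bool) n =>
      if PySem.Int.mod n 2 ≠ 0 then (st.1 * n, true) else st)
    (1, false)
  if st.2 then st.1 else 0

-- ===== PORT B =====
-- def go(seg): divide-and-conquer optional product of the odd numbers of seg
def pvGo : List Int → Option Int
  | [] => none
  | [n] => if PySem.Int.mod n 2 ≠ 0 then some n else none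
  | a :: b :: rest =>
    let seg := a :: b :: rest
    let mid := seg.length / 2
    let left := pvGo (seg.take mid)
    let right := pvGo (seg.drop mid)
    match left with
    | none => right
    | some l =>
      match right with
      | none => some l
      | some r => some (l * r)
  termination_by seg => seg.length
  decreasing_by
    · simp [List.length_take]; omega
    · simp [List.length_drop]; omega

def produto_impares_alt (numeros : List Int) : Int :=
  match pvGo numeros with
  | none => 0
  | some r => r

-- ===== PRECONDITION & SPEC =====
def Spec_produto_impares (numeros : List Int) (out : Int) : Prop := out = produto_impares_alt numeros
instance (numeros : List Int) (out : Int) : Decidable (Spec_produto_impares numeros out) := by unfold Spec_produto_impares; infer_instance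

-- ===== CLAIM (what is proved, stated in full; the proofs are below) =====
def Claim_equal_produto_impares : Prop := ∀ (numeros : List Int), Dom_produto_impares numeros → Spec_produto_impares numeros (produto_impares numeros)

-- ===== LEMMAS AND PROOFS =====

-- Python's n % 2 for divisor 2 is plain emod
theorem pv_mod_two (n : Int) : PySem.Int.mod n 2 = n % 2 := by
  simp [PySem.Int.mod, Int.fmod_eq_emod]

-- A's loop invariant: the fold is the filtered product with the flag = "some odd seen"
theorem produto_impares_fold_eq (xs : List Int) (p : Int) (b : Bool) :
    xs.foldl
      (fun (st : Int × Bool) n =>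
        if PySem.Int.mod n 2 ≠ 0 then (st.1 * n, true) else st)
      (p, b)
    = (p * (xs.filter (fun n => PySem.Int.mod n 2 ≠ 0)).prod,
       b || !(xs.filter (fun n => PySem.Int.mod n 2 ≠ 0)).isEmpty) := by
  simp only [pv_mod_two]
  induction xs generalizing p b with
  | nil =>
    simp only [List.foldl_nil, List.filter_nil, List.prod_nil, mul_one,
      List.isEmpty_nil, Bool.not_true, Bool.or_false]
  | cons x xs ih =>
    simp only [List.foldl_cons, List.filter_cons]
    by_cases h : x % 2 ≠ 0
    · rw [if_pos h, if_pos (decide_eq_true h), ih, List.prod_cons, List.isEmpty_cons]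
      simp only [Prod.mk.injEq, Bool.or_true, Bool.not_false]
      exact ⟨by ring, rfl⟩
    · rw [if_neg h, if_neg (by simp; omega), ih]

-- B's recursion computes the optional product of the odd numbers of the segment
theorem pvGo_eq (seg : List Int) :
    pvGo seg =
      (if (seg.filter (fun n => PySem.Int.mod n 2 ≠ 0)).isEmpty then none
       else some (seg.filter (fun n => PySem.Int.mod n 2 ≠ 0)).prod) := by
  match seg with
  | [] => simp [pvGo]
  | [n] =>
    simp only [pvGo, pv_mod_two, List.filter_cons, List.filter_nil]
    by_cases h : n % 2 ≠ 0 <;> simp [h]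
  | a :: b :: rest =>
    rw [pvGo]
    have hmid : (a :: b :: rest).length / 2 < (a :: b :: rest).length := by
      simp; omega
    have h1 : ((a :: b :: rest).take ((a :: b :: rest).length / 2)).length
        < (a :: b :: rest).length := by
      simp [List.length_take]; omega
    have h2 : ((a :: b :: rest).drop ((a :: b :: rest).length / 2)).length
        < (a :: b :: rest).length := by
      simp [List.length_drop]; omega
    rw [pvGo_eq ((a :: b :: rest).take ((a :: b :: rest).length / 2)),
        pvGo_eq ((a :: b :: rest).drop ((a :: b :: rest).length / 2))]
    have hsplit : (a :: b :: rest).filter (fun n => PySem.Int.mod n 2 ≠ 0)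
        = ((a :: b :: rest).take ((a :: b :: rest).length / 2)).filter
            (fun n => PySem.Int.mod n 2 ≠ 0)
          ++ ((a :: b :: rest).drop ((a :: b :: rest).length / 2)).filter
            (fun n => PySem.Int.mod n 2 ≠ 0) := by
      rw [← List.filter_append, List.take_append_drop]
    rw [hsplit]
    cases hL : (((a :: b :: rest).take ((a :: b :: rest).length / 2)).filter
        (fun n => PySem.Int.mod n 2 ≠ 0)) with
    | nil =>
      simp only [List.isEmpty_nil, if_true, List.nil_append]
    | cons x xs =>
      cases hR : (((a :: b :: rest).drop ((a :: b :: rest).length / 2)).filter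
          (fun n => PySem.Int.mod n 2 ≠ 0)) with
      | nil => simp
      | cons y ys => simp [List.prod_append, mul_assoc]
  termination_by seg.length

-- ===== VERDICT (by name: the statement is the Claim_ definition above) =====
theorem produto_impares_spec : Claim_equal_produto_impares := by
  intro numeros _
  unfold Spec_produto_impares produto_impares produto_impares_alt
  rw [produto_impares_fold_eq, pvGo_eq]
  cases hb : (numeros.filter (fun n => PySem.Int.mod n 2 ≠ 0)).isEmpty
  · simp only [Bool.not_false, Bool.false_or, if_true, one_mul,
      Bool.false_eq_true, if_false]
  · simp only [Bool.not_true, Bool.false_or, Bool.false_eq_true, if_false, if_true]
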